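-- pv_equiv track=rewrite | github.com/tsuru7/algorithm-study | AtCoder/ABC/201-300/ABC282/B.py | solve
-- ===== SOURCE A (Python) =====
-- def solve(n,m,sList):
--     tList = []
--     for i in range(n):
--         tmp = 0
--         for j in range(m):
--             sij = sList[i][j]
--             if sij == 'o':
--                 tmp |= 1<<j
--         tList.append(tmp)
--     ans=0
--     for i in range(n):
--         for j in range(i+1, n):
--             if tList[i] | tList[j] == (1<<m)-1:
--                 ans += 1
--     return ans
-- ===== SOURCE B (Python) =====
-- def solve(n, m, sList):
--     ans = 0
--     for i in range(n):
--         for j in range(i + 1, n):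
--             if all(sList[i][k] == 'o' or sList[j][k] == 'o' for k in range(m)):
--                 ans += 1
--     return ans
-- ===== Notes on version B (the rewrite author's own statement) =====
-- stated objective: simpler
-- what changed: Dropped A's bitmask table-building pass entirely; B keeps the pairwise loop but decides each pair by a direct per-column character check over the raw strings instead of OR-ing precomputed integer masks.
import Mathlib
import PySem

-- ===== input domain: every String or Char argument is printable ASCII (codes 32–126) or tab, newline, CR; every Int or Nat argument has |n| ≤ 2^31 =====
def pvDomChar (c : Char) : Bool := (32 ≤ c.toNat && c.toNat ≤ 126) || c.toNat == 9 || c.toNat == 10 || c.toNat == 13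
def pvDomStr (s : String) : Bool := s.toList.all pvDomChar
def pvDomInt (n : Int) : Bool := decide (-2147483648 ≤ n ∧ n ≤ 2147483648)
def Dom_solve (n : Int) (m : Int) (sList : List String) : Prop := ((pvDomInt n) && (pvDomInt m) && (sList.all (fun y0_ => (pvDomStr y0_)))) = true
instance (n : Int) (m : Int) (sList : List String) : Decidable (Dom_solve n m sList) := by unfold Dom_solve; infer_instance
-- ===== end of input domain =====

-- B drops A's bitmask table-building pass and tests each pair by a direct per-column character check (simpler, same pairwise loop).


-- ===== PORT A =====
-- `1<<j` for 0 ≤ j is ported as ((1 <<< j.toNat : Nat) : Int); Pre_ excludes the inputs where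
-- Python reaches a negative shift (ValueError) or an out-of-range index (IndexError).
def solve (n : Int) (m : Int) (sList : List String) : Int :=
  let tList : List Int :=
    (PySem.List.pyRange 0 n 1).foldl (fun acc i =>
      acc ++ [(PySem.List.pyRange 0 m 1).foldl (fun tmp j =>
        if (PySem.Str.pyGet? ((PySem.List.pyGet? sList i).getD "") j).getD ' ' = 'o'
        then Int.lor tmp ((1 <<< j.toNat : Nat) : Int) else tmp) 0]) []
  (PySem.List.pyRange 0 n 1).foldl (fun ans i =>
    (PySem.List.pyRange (i + 1) n 1).foldl (fun ans j =>
      if Int.lor (PySem.List.pyGetD tList i 0) (PySem.List.pyGetD tList j 0)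
           = ((1 <<< m.toNat : Nat) : Int) - 1
      then ans + 1 else ans) ans) 0

-- ===== PORT B =====
def coversAll (m : Int) (s t : String) : Bool :=
  (PySem.List.pyRange 0 m 1).all (fun k =>
    decide ((PySem.Str.pyGet? s k).getD ' ' = 'o') || decide ((PySem.Str.pyGet? t k).getD ' ' = 'o'))

def solve_alt (n : Int) (m : Int) (sList : List String) : Int :=
  (PySem.List.pyRange 0 n 1).foldl (fun ans i =>
    (PySem.List.pyRange (i + 1) n 1).foldl (fun ans j =>
      if coversAll m ((PySem.List.pyGet? sList i).getD "") ((PySem.List.pyGet? sList j).getD "")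
      then ans + 1 else ans) ans) 0

-- ===== PRECONDITION & SPEC =====
-- Exactly where Python A returns: each of the first n strings exists and has at least m
-- characters (else IndexError), and if any pair is examined (n ≥ 2) the shift 1<<m needs m ≥ 0 (else ValueError).
def Pre_solve (n : Int) (m : Int) (sList : List String) : Prop :=
  n ≤ (sList.length : Int) ∧ (∀ s ∈ sList.take n.toNat, m ≤ PySem.Str.len s) ∧ (2 ≤ n → 0 ≤ m)
instance (n : Int) (m : Int) (sList : List String) : Decidable (Pre_solve n m sList) := by
  unfold Pre_solve; infer_instance
def pvWitness_solve : Int × Int × List String := (2, 2, ["ox", "xo"])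

def Spec_solve (n : Int) (m : Int) (sList : List String) (out : Int) : Prop := out = solve_alt n m sList
instance (n : Int) (m : Int) (sList : List String) (out : Int) : Decidable (Spec_solve n m sList out) := by unfold Spec_solve; infer_instance

-- ===== CLAIM (what is proved, stated in full; the proofs are below) =====
def Claim_equal_solve : Prop := ∀ (n : Int) (m : Int) (sList : List String), Dom_solve n m sList → Pre_solve n m sList → Spec_solve n m sList (solve n m sList)

-- ===== LEMMAS AND PROOFS =====

-- Nat-level mask of the first M columns of cs
def natMask (M : Nat) (cs : List Char) : Nat :=
  (List.range M).foldl (fun t j => if cs[j]?.getD ' ' = 'o' then t ||| (1 <<< j) else t) 0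

theorem natMask_succ (M : Nat) (cs : List Char) :
    natMask (M + 1) cs = if cs[M]?.getD ' ' = 'o' then natMask M cs ||| (1 <<< M) else natMask M cs := by
  simp [natMask, List.range_succ]

theorem testBit_natMask (M : Nat) (cs : List Char) (k : Nat) :
    (natMask M cs).testBit k = (decide (k < M) && decide (cs[k]?.getD ' ' = 'o')) := by
  induction M with
  | zero => simp [natMask]
  | succ M ih =>
    rw [natMask_succ]
    split_ifs with h
    · rw [Nat.testBit_lor, ih, Nat.shiftLeft_eq, one_mul, Nat.testBit_two_pow]
      by_cases hk : k = M
      · subst hk; simp [h]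
      · have h1 : decide (M = k) = false := by simp [Ne.symm hk]
        have h2 : decide (k < M + 1) = decide (k < M) := by rw [decide_eq_decide]; omega
        rw [h1, h2]; simp
    · rw [ih]
      by_cases hk : k = M
      · subst hk; simp [h]
      · have h2 : decide (k < M + 1) = decide (k < M) := by rw [decide_eq_decide]; omega
        rw [h2]

theorem lor_masks_eq_iff (M : Nat) (cs ds : List Char) :
    (natMask M cs ||| natMask M ds = 2 ^ M - 1)
      ↔ ∀ k < M, cs[k]?.getD ' ' = 'o' ∨ ds[k]?.getD ' ' = 'o' := by
  constructor
  · intro h k hk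
    have := congrArg (fun x => Nat.testBit x k) h
    simp only [Nat.testBit_lor, testBit_natMask, Nat.testBit_two_pow_sub_one] at this
    rw [decide_eq_true hk] at this
    simp only [Bool.true_and, Bool.or_eq_true, decide_eq_true_eq] at this
    exact this
  · intro h
    apply Nat.eq_of_testBit_eq
    intro k
    rw [Nat.testBit_lor, testBit_natMask, testBit_natMask, Nat.testBit_two_pow_sub_one]
    by_cases hk : k < M
    · rcases h k hk with h' | h' <;> simp [hk, h']
    · simp [hk]

theorem int_lor_ofNat (a b : Nat) : Int.lor (Int.ofNat a) (Int.ofNat b) = Int.ofNat (a ||| b) := rfl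

-- the Int accumulator fold of port A equals the Nat-level mask
theorem foldl_range_int_nat (cs : List Char) (M : Nat) :
    (List.range M).foldl (fun tmp k =>
        if cs[k]?.getD ' ' = 'o' then Int.lor tmp ((1 <<< k : Nat) : Int) else tmp) 0
      = Int.ofNat (natMask M cs) := by
  induction M with
  | zero => simp [natMask]
  | succ M ih =>
    rw [List.range_succ, List.foldl_append, ih, natMask_succ]
    simp only [List.foldl_cons, List.foldl_nil]
    split_ifs with h
    · exact int_lor_ofNat _ _
    · rfl

-- the inner mask loop of port A, over pyRange, as natMask
theorem intMask_eq (m : Int) (s : String) :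
    (PySem.List.pyRange 0 m 1).foldl (fun tmp j =>
        if (PySem.Str.pyGet? s j).getD ' ' = 'o'
        then Int.lor tmp ((1 <<< j.toNat : Nat) : Int) else tmp) 0
      = Int.ofNat (natMask m.toNat s.toList) := by
  rw [PySem.List.pyRange_one, List.foldl_map]
  have heq : (fun (tmp : Int) (j : Nat) =>
        if (PySem.Str.pyGet? s ((0 : Int) + (j : Int))).getD ' ' = 'o'
        then Int.lor tmp ((1 <<< ((0 : Int) + (j : Int)).toNat : Nat) : Int) else tmp) =
      (fun (tmp : Int) (j : Nat) =>
        if s.toList[j]?.getD ' ' = 'o'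
        then Int.lor tmp ((1 <<< j : Nat) : Int) else tmp) := by
    funext tmp j
    simp only [zero_add, PySem.Str.pyGet?_natCast, Int.toNat_natCast]
  rw [heq]
  have hm : (m - 0).toNat = m.toNat := by omega
  rw [hm]
  exact foldl_range_int_nat s.toList m.toNat

theorem coversAll_iff (m : Int) (s t : String) :
    coversAll m s t = true
      ↔ ∀ k < m.toNat, s.toList[k]?.getD ' ' = 'o' ∨ t.toList[k]?.getD ' ' = 'o' := by
  unfold coversAll
  rw [PySem.List.pyRange_one, List.all_map]
  have heq : ((fun k => decide ((PySem.Str.pyGet? s k).getD ' ' = 'o')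
                || decide ((PySem.Str.pyGet? t k).getD ' ' = 'o')) ∘ (fun (k : Nat) => (0 : Int) + (k : Int))) =
      (fun (k : Nat) => decide (s.toList[k]?.getD ' ' = 'o') || decide (t.toList[k]?.getD ' ' = 'o')) := by
    funext k
    simp only [Function.comp, zero_add, PySem.Str.pyGet?_natCast]
  rw [heq, List.all_eq_true]
  have hm : (m - 0).toNat = m.toNat := by omega
  rw [hm]
  constructor
  · intro h k hk
    have := h k (List.mem_range.mpr hk)
    simpa using this
  · intro h j hj
    rw [List.mem_range] at hj
    simpa using h j hj

theorem foldl_cong {α β : Type} (l : List α) (f g : β → α → β) (init : β)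
    (h : ∀ acc, ∀ x ∈ l, f acc x = g acc x) : l.foldl f init = l.foldl g init := by
  induction l generalizing init with
  | nil => rfl
  | cons a l ih =>
    simp only [List.foldl_cons]
    rw [h init a (List.mem_cons_self)]
    exact ih _ (fun acc x hx => h acc x (List.mem_cons_of_mem _ hx))

-- per-pair condition equivalence (positions past the string ends read as ' ' ≠ 'o' on both sides)
theorem cond_iff (m : Int) (s t : String) :
    (Int.lor (Int.ofNat (natMask m.toNat s.toList)) (Int.ofNat (natMask m.toNat t.toList))
        = ((1 <<< m.toNat : Nat) : Int) - 1)
      ↔ coversAll m s t = true := by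
  rw [int_lor_ofNat]
  have h2 : (1 : Nat) ≤ 2 ^ m.toNat := Nat.one_le_two_pow
  have h1 : ((1 <<< m.toNat : Nat) : Int) - 1 = Int.ofNat (2 ^ m.toNat - 1) := by
    rw [Nat.shiftLeft_eq, one_mul]
    generalize 2 ^ m.toNat = P at h2 ⊢
    simp only [Int.ofNat_eq_natCast]
    omega
  rw [h1]
  rw [show ∀ a b : Nat, (Int.ofNat a = Int.ofNat b) ↔ a = b from fun a b => Int.ofNat_inj]
  rw [lor_masks_eq_iff, coversAll_iff]

-- ===== VERDICT (by name: the statement is the Claim_ definition above) =====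
theorem solve_spec : Claim_equal_solve := by
  intro n m sList _ _
  unfold Spec_solve solve solve_alt
  have htl :
      (PySem.List.pyRange 0 n 1).foldl (fun acc i =>
        acc ++ [(PySem.List.pyRange 0 m 1).foldl (fun tmp j =>
          if (PySem.Str.pyGet? ((PySem.List.pyGet? sList i).getD "") j).getD ' ' = 'o'
          then Int.lor tmp ((1 <<< j.toNat : Nat) : Int) else tmp) 0]) []
      = (PySem.List.pyRange 0 n 1).map (fun i =>
          Int.ofNat (natMask m.toNat ((PySem.List.pyGet? sList i).getD "").toList)) := by
    rw [PySem.List.foldl_append_singleton_eq_map]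
    apply List.map_congr_left
    intro i _
    exact intMask_eq m _
  rw [htl]
  apply foldl_cong
  intro ans i hi
  rw [PySem.List.mem_pyRange_one] at hi
  apply foldl_cong
  intro acc j hj
  rw [PySem.List.mem_pyRange_one] at hj
  rw [PySem.List.pyGetD_map_pyRange_of_nonneg _ _ _ _ hi.1 hi.2,
      PySem.List.pyGetD_map_pyRange_of_nonneg _ _ _ _ (by omega) hj.2]
  exact if_congr (cond_iff m _ _) rfl rfl
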